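-- pv_equiv track=rewrite | github.com/fullscreen-triangle/stella-lorraine | counting/src/StateCounting.py | identify_charge_bearing_residues
-- ===== SOURCE A (Python) =====
-- from typing import List, Dict, Tuple, Optional, Set
--
-- BASIC_RESIDUES = {'K', 'R', 'H'}
--
-- PROTON_AFFINITY = {
--     'R': 1000,   # Arginine - highest
--     'K': 900,    # Lysine
--     'H': 800,    # Histidine
--     'N-term': 750,  # N-terminus
--     'Q': 700,    # Glutamine
--     'N': 700,    # Asparagine
--     'E': 650,    # Glutamate
--     'D': 650,    # Aspartate
--     'S': 600,    # Serine
--     'T': 600,    # Threonine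
--     'other': 500  # Other residues
-- }
--
-- def identify_charge_bearing_residues(sequence: str, charge: int) -> List[Tuple[int, str]]:
--     """
--     Identify residues likely to bear charge based on proton affinity.
--
--     For peptides, charges typically localize on:
--     1. Basic residues (K, R, H) - highest priority
--     2. N-terminus
--     3. Backbone amides
--
--     Args:
--         sequence: Amino acid sequence
--         charge: Total charge on the peptide
--
--     Returns:
--         List of (position, residue) tuples for charge-bearing sites
--     """
--     if not sequence or charge <= 0:
--         return []
--
--     # Build list of potential charge sites with affinities
--     charge_sites = []
--
--     # N-terminus always a potential site
--     charge_sites.append((0, 'N-term', PROTON_AFFINITY['N-term']))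
--
--     # Scan sequence for basic residues
--     for i, aa in enumerate(sequence):
--         if aa in BASIC_RESIDUES:
--             charge_sites.append((i, aa, PROTON_AFFINITY[aa]))
--         elif aa in PROTON_AFFINITY:
--             charge_sites.append((i, aa, PROTON_AFFINITY[aa]))
--         else:
--             charge_sites.append((i, aa, PROTON_AFFINITY['other']))
--
--     # Sort by proton affinity (highest first)
--     charge_sites.sort(key=lambda x: -x[2])
--
--     # Select top 'charge' sites
--     selected = charge_sites[:charge]
--
--     return [(pos, res) for pos, res, _ in selected]
-- ===== SOURCE B (Python) =====
-- AFFINITY_ORDER = (1000, 900, 800, 750, 700, 650, 600, 500)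
--
-- _AFF = {'R': 1000, 'K': 900, 'H': 800, 'Q': 700, 'N': 700,
--         'E': 650, 'D': 650, 'S': 600, 'T': 600}
--
-- def identify_charge_bearing_residues(sequence, charge):
--     if not sequence or charge <= 0:
--         return []
--     buckets = {a: [] for a in AFFINITY_ORDER}
--     buckets[750].append((0, 'N-term'))
--     get = _AFF.get
--     for i, aa in enumerate(sequence):
--         buckets[get(aa, 500)].append((i, aa))
--     sites = []
--     for a in AFFINITY_ORDER:
--         sites += buckets[a]
--     return sites[:charge]
-- ===== Notes on version B (the rewrite author's own statement) =====
-- stated objective: alternative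
-- what changed: Replaced building a triple list and comparison-sorting it by negated affinity with a single-pass bucket (counting) sort over the 8 fixed discrete affinity values, concatenating buckets from highest affinity down and slicing off the first 'charge' sites.
import Mathlib
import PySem

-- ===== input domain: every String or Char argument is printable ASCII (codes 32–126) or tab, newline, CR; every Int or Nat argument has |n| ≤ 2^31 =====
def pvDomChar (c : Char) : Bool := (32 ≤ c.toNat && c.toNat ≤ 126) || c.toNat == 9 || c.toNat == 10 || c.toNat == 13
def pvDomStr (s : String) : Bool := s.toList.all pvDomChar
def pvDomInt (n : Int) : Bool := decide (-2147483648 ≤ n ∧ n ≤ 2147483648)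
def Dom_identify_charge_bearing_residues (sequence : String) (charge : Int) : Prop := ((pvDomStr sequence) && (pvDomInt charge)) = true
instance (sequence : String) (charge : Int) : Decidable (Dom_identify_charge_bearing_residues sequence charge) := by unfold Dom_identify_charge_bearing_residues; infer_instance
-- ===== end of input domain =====

-- B replaces A's build-then-comparison-sort with a one-pass bucket sort over the 8 fixed
-- discrete affinity values (stable, buckets concatenated highest-affinity first); objective: alternative.

-- ===== PORT A =====
def pvBasicResidues : List String := ["K", "R", "H"]

def pvProtonAffinity : PySem.Dict String Int :=
  PySem.Dict.mk [("R", 1000), ("K", 900), ("H", 800), ("N-term", 750), ("Q", 700),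
                 ("N", 700), ("E", 650), ("D", 650), ("S", 600), ("T", 600), ("other", 500)]

def identify_charge_bearing_residues (sequence : String) (charge : Int) : List (Int × String) :=
  if sequence.toList = [] ∨ charge ≤ 0 then []
  else
    -- charge_sites: N-terminus first, then one entry per residue (guarded dict lookups)
    let chargeSites : List (Int × String × Int) :=
      (PySem.List.enumerate sequence.toList).foldl
        (fun acc p =>
          let aa := String.mk [p.2]
          if aa ∈ pvBasicResidues then acc ++ [(p.1, aa, pvProtonAffinity.getD aa 0)]
          else if (pvProtonAffinity.get? aa).isSome then acc ++ [(p.1, aa, pvProtonAffinity.getD aa 0)]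
          else acc ++ [(p.1, aa, pvProtonAffinity.getD "other" 0)])
        [(0, "N-term", pvProtonAffinity.getD "N-term" 0)]
    let sortedSites := PySem.List.sorted chargeSites (fun x => -x.2.2)
    let selected := PySem.List.slice sortedSites none (some charge)
    selected.map (fun x => (x.1, x.2.1))

-- ===== PORT B =====
def pvAffinityOrder : List Int := [1000, 900, 800, 750, 700, 650, 600, 500]

def pvAff : PySem.Dict String Int :=
  PySem.Dict.mk [("R", 1000), ("K", 900), ("H", 800), ("Q", 700), ("N", 700),
                 ("E", 650), ("D", 650), ("S", 600), ("T", 600)]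

def identify_charge_bearing_residues_alt (sequence : String) (charge : Int) : List (Int × String) :=
  if sequence.toList = [] ∨ charge ≤ 0 then []
  else
    let buckets0 : PySem.Dict Int (List (Int × String)) :=
      PySem.Dict.mk (pvAffinityOrder.map (fun a => (a, ([] : List (Int × String)))))
    let buckets1 := buckets0.modify 750 [] (· ++ [(0, "N-term")])
    let buckets := (PySem.List.enumerate sequence.toList).foldl
      (fun d p => d.modify (pvAff.getD (String.mk [p.2]) 500) []
                    (· ++ [(p.1, String.mk [p.2])])) buckets1
    let sites := pvAffinityOrder.foldl (fun sites a => sites ++ buckets.getD a []) []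
    PySem.List.slice sites none (some charge)

-- ===== PRECONDITION & SPEC =====
def Spec_identify_charge_bearing_residues (sequence : String) (charge : Int) (out : List (Int × String)) : Prop := out = identify_charge_bearing_residues_alt sequence charge
instance (sequence : String) (charge : Int) (out : List (Int × String)) : Decidable (Spec_identify_charge_bearing_residues sequence charge out) := by unfold Spec_identify_charge_bearing_residues; infer_instance

-- ===== CLAIM (what is proved, stated in full; the proofs are below) =====
def Claim_equal_identify_charge_bearing_residues : Prop := ∀ (sequence : String) (charge : Int), Dom_identify_charge_bearing_residues sequence charge → Spec_identify_charge_bearing_residues sequence charge (identify_charge_bearing_residues sequence charge)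


-- ===== LEMMAS AND PROOFS =====

-- A's per-residue site triple (the body of A's loop, as a function)
def pvFA (p : Int × Char) : Int × String × Int :=
  if String.mk [p.2] ∈ pvBasicResidues then (p.1, String.mk [p.2], pvProtonAffinity.getD (String.mk [p.2]) 0)
  else if (pvProtonAffinity.get? (String.mk [p.2])).isSome then (p.1, String.mk [p.2], pvProtonAffinity.getD (String.mk [p.2]) 0)
  else (p.1, String.mk [p.2], pvProtonAffinity.getD "other" 0)

-- the affinity B assigns to a residue character
def pvAffC (c : Char) : Int := pvAff.getD (String.mk [c]) 500

def pvPair (p : Int × Char) : Int × String := (p.1, String.mk [p.2])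


theorem pv_ne_nterm (c : Char) : "N-term" ≠ String.mk [c] := by
  intro h
  have h2 := congrArg String.toList h
  rw [show (String.mk [c]).toList = [c] from Eq.symm (String.ofList_eq.mp rfl)] at h2
  simp at h2

theorem pv_ne_other (c : Char) : "other" ≠ String.mk [c] := by
  intro h
  have h2 := congrArg String.toList h
  rw [show (String.mk [c]).toList = [c] from Eq.symm (String.ofList_eq.mp rfl)] at h2
  simp at h2

theorem pvFA_eq (p : Int × Char) : pvFA p = (p.1, String.mk [p.2], pvAffC p.2) := by
  by_cases hR : String.mk [p.2] = "R"
  · simp [pvFA, pvAffC, hR, pvBasicResidues, pvProtonAffinity, pvAff, PySem.Dict.getD, PySem.Dict.get?]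
  by_cases hK : String.mk [p.2] = "K"
  · simp [pvFA, pvAffC, hK, pvBasicResidues, pvProtonAffinity, pvAff, PySem.Dict.getD, PySem.Dict.get?]
  by_cases hH : String.mk [p.2] = "H"
  · simp [pvFA, pvAffC, hH, pvBasicResidues, pvProtonAffinity, pvAff, PySem.Dict.getD, PySem.Dict.get?]
  by_cases hQ : String.mk [p.2] = "Q"
  · simp [pvFA, pvAffC, hQ, pvBasicResidues, pvProtonAffinity, pvAff, PySem.Dict.getD, PySem.Dict.get?]
  by_cases hN : String.mk [p.2] = "N"
  · simp [pvFA, pvAffC, hN, pvBasicResidues, pvProtonAffinity, pvAff, PySem.Dict.getD, PySem.Dict.get?]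
  by_cases hE : String.mk [p.2] = "E"
  · simp [pvFA, pvAffC, hE, pvBasicResidues, pvProtonAffinity, pvAff, PySem.Dict.getD, PySem.Dict.get?]
  by_cases hD : String.mk [p.2] = "D"
  · simp [pvFA, pvAffC, hD, pvBasicResidues, pvProtonAffinity, pvAff, PySem.Dict.getD, PySem.Dict.get?]
  by_cases hS : String.mk [p.2] = "S"
  · simp [pvFA, pvAffC, hS, pvBasicResidues, pvProtonAffinity, pvAff, PySem.Dict.getD, PySem.Dict.get?]
  by_cases hT : String.mk [p.2] = "T"
  · simp [pvFA, pvAffC, hT, pvBasicResidues, pvProtonAffinity, pvAff, PySem.Dict.getD, PySem.Dict.get?]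
  · simp [pvFA, pvAffC, Ne.symm hR, Ne.symm hK, Ne.symm hH, Ne.symm hQ, Ne.symm hN, Ne.symm hE,
          Ne.symm hD, Ne.symm hS, Ne.symm hT, pv_ne_nterm p.2, pv_ne_other p.2,
          pvBasicResidues, pvProtonAffinity, pvAff, PySem.Dict.getD, PySem.Dict.get?]
    exact ⟨hK, hR, hH⟩

theorem pvAffC_mem (c : Char) : pvAffC c ∈ ([1000, 900, 800, 700, 650, 600, 500] : List Int) := by
  by_cases hR : String.mk [c] = "R"
  · simp [pvAffC, hR, pvAff, PySem.Dict.getD, PySem.Dict.get?]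
  by_cases hK : String.mk [c] = "K"
  · simp [pvAffC, hK, pvAff, PySem.Dict.getD, PySem.Dict.get?]
  by_cases hH : String.mk [c] = "H"
  · simp [pvAffC, hH, pvAff, PySem.Dict.getD, PySem.Dict.get?]
  by_cases hQ : String.mk [c] = "Q"
  · simp [pvAffC, hQ, pvAff, PySem.Dict.getD, PySem.Dict.get?]
  by_cases hN : String.mk [c] = "N"
  · simp [pvAffC, hN, pvAff, PySem.Dict.getD, PySem.Dict.get?]
  by_cases hE : String.mk [c] = "E"
  · simp [pvAffC, hE, pvAff, PySem.Dict.getD, PySem.Dict.get?]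
  by_cases hD : String.mk [c] = "D"
  · simp [pvAffC, hD, pvAff, PySem.Dict.getD, PySem.Dict.get?]
  by_cases hS : String.mk [c] = "S"
  · simp [pvAffC, hS, pvAff, PySem.Dict.getD, PySem.Dict.get?]
  by_cases hT : String.mk [c] = "T"
  · simp [pvAffC, hT, pvAff, PySem.Dict.getD, PySem.Dict.get?]
  · simp [pvAffC, Ne.symm hR, Ne.symm hK, Ne.symm hH, Ne.symm hQ, Ne.symm hN, Ne.symm hE,
          Ne.symm hD, Ne.symm hS, Ne.symm hT, pvAff, PySem.Dict.getD, PySem.Dict.get?]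

-- insertBy walks past a block of elements it does not go before
theorem pv_insertBy_skip {a : Type} (before : a → a → Bool) (x : a) (l1 l2 : List a)
    (h : ∀ y ∈ l1, before x y = false) :
    PySem.List.insertBy before x (l1 ++ l2) = l1 ++ PySem.List.insertBy before x l2 := by
  induction l1 with
  | nil => simp
  | cons y ys ih =>
    have hy : before x y = false := h y (by simp)
    simp [PySem.List.insertBy, hy]
    exact ih (fun z hz => h z (by simp [hz]))

theorem pv_insertBy_all_before {a : Type} (before : a → a → Bool) (x : a) (l : List a)
    (h : ∀ y ∈ l, before x y = true) :
    PySem.List.insertBy before x l = x :: l := by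
  cases l with
  | nil => simp [PySem.List.insertBy]
  | cons y ys => simp [PySem.List.insertBy, h y (by simp)]

theorem pv_insertBy_flatMap {a : Type} (key : a → Int) (x : a) (vs : List Int) (F : Int → List a)
    (hvs : vs.Pairwise (· < ·)) (hmem : key x ∈ vs) (hF : ∀ v, ∀ y ∈ F v, key y = v) :
    PySem.List.insertBy (fun i j => decide (key i < key j)) x (vs.flatMap F)
      = vs.flatMap (fun v => F v ++ if key x = v then [x] else []) := by
  induction vs with
  | nil => simp at hmem
  | cons v vs' ih =>
    have hlt : ∀ w ∈ vs', v < w := (List.pairwise_cons.mp hvs).1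
    by_cases hxv : key x = v
    · have h1 : ∀ y ∈ F v, (fun i j => decide (key i < key j)) x y = false := by
        intro y hy
        simp [hF v y hy, hxv]
      have h2 : ∀ y ∈ vs'.flatMap F, (fun i j => decide (key i < key j)) x y = true := by
        intro y hy
        rcases List.mem_flatMap.mp hy with ⟨w, hw, hyw⟩
        simp [hF w y hyw, hxv]
        exact hlt w hw
      have hnot : ∀ w ∈ vs', ¬ (key x = w) := by
        intro w hw he
        exact absurd (he ▸ hxv ▸ hlt w hw) (lt_irrefl _)
      rw [List.flatMap_cons, pv_insertBy_skip _ _ _ _ h1, pv_insertBy_all_before _ _ _ h2]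
      rw [List.flatMap_cons, if_pos hxv]
      have : vs'.flatMap (fun v => F v ++ if key x = v then [x] else []) = vs'.flatMap F := by
        apply List.flatMap_congr
        intro w hw
        simp [hnot w hw]
      rw [this]
      simp
    · have hxvs' : key x ∈ vs' := by
        rcases List.mem_cons.mp hmem with h | h
        · exact absurd h hxv
        · exact h
      have h1 : ∀ y ∈ F v, (fun i j => decide (key i < key j)) x y = false := by
        intro y hy
        have : v < key x := hlt _ hxvs'
        simp [hF v y hy]
        omega
      rw [List.flatMap_cons, pv_insertBy_skip _ _ _ _ h1,
          ih (List.pairwise_cons.mp hvs).2 hxvs']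
      rw [List.flatMap_cons, if_neg hxv]
      simp

theorem pv_sorted_buckets {a : Type} (key : a → Int) (vs : List Int) (xs : List a)
    (hvs : vs.Pairwise (· < ·)) (hx : ∀ x ∈ xs, key x ∈ vs) :
    PySem.List.sorted xs key = vs.flatMap (fun v => xs.filter (fun x => key x == v)) := by
  rw [PySem.List.sorted_eq_foldl_insertBy]
  induction xs using List.reverseRecOn with
  | nil => simp
  | append_singleton ys x ih =>
    rw [List.foldl_append, List.foldl_cons, List.foldl_nil]
    rw [ih (fun z hz => hx z (by simp [hz]))]
    rw [pv_insertBy_flatMap key x vs _ hvs (hx x (by simp))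
        (fun v y hy => by simpa using (List.mem_filter.mp hy).2)]
    apply List.flatMap_congr
    intro v hv
    by_cases h : key x = v <;> simp [List.filter_append, h]

-- B's bucket fold appends each site to its bucket
theorem pv_fold_buckets (xs : List (Int × Char)) (d : PySem.Dict Int (List (Int × String))) (v : Int) :
    ((xs.foldl (fun d p => d.modify (pvAff.getD (String.mk [p.2]) 500) []
        (fun l => l ++ [(p.1, String.mk [p.2])])) d).getD v [])
      = d.getD v [] ++ (xs.filter (fun p => pvAffC p.2 == v)).map pvPair := by
  induction xs generalizing d with
  | nil => simp
  | cons p ps ih =>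
    rw [List.foldl_cons, ih]
    by_cases h : pvAffC p.2 = v
    · have : v = pvAff.getD (String.mk [p.2]) 500 := by rw [← h]; rfl
      simp [PySem.Dict.modify, ← this, h, pvPair]
    · have hne : ¬ (v = pvAff.getD (String.mk [p.2]) 500) := by
        intro he
        exact h (by rw [pvAffC, ← he])
      simp [PySem.Dict.modify, PySem.Dict.getD_insert, hne, h]

-- per-affinity bucket of A's sorted output equals B's bucket content
theorem pv_bucket (e : List (Int × Char)) (v : Int) :
    ((e.map pvFA).filter (fun x => -x.2.2 == v)).map (fun x => (x.1, x.2.1))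
      = (e.filter (fun p => pvAffC p.2 == -v)).map pvPair := by
  induction e with
  | nil => rfl
  | cons p ps ih =>
    simp only [List.map_cons, List.filter_cons]
    by_cases h : pvAffC p.2 = -v
    · simp [pvFA_eq, pvPair, h, ih]
    · have h' : ¬ (-pvAffC p.2 = v) := fun he => h (by omega)
      simp [pvFA_eq, h, h', ih]

-- ===== VERDICT (by name: the statement is the Claim_ definition above) =====
theorem identify_charge_bearing_residues_spec : Claim_equal_identify_charge_bearing_residues := by
  intro sequence charge _
  unfold Spec_identify_charge_bearing_residues
  unfold identify_charge_bearing_residues identify_charge_bearing_residues_alt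
  by_cases hguard : sequence.toList = [] ∨ charge ≤ 0
  · rw [if_pos hguard, if_pos hguard]
  rw [if_neg hguard, if_neg hguard]
  dsimp only
  have hch : (0:Int) ≤ charge := by
    rcases not_or.mp hguard with ⟨_, h2⟩
    omega
  have hfun : (fun (acc : List (Int × String × Int)) (p : Int × Char) =>
      if String.mk [p.2] ∈ pvBasicResidues then acc ++ [(p.1, String.mk [p.2], pvProtonAffinity.getD (String.mk [p.2]) 0)]
      else if (pvProtonAffinity.get? (String.mk [p.2])).isSome then acc ++ [(p.1, String.mk [p.2], pvProtonAffinity.getD (String.mk [p.2]) 0)]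
      else acc ++ [(p.1, String.mk [p.2], pvProtonAffinity.getD "other" 0)])
      = (fun acc p => acc ++ [pvFA p]) := by
    funext acc p
    simp only [pvFA]
    split_ifs <;> rfl
  rw [hfun, PySem.List.foldl_append_singleton_eq_map]
  have hnt : pvProtonAffinity.getD "N-term" 0 = 750 := rfl
  rw [hnt, List.singleton_append]
  have hmemb : ∀ x ∈ ((0:Int), ("N-term":String), (750:Int)) :: (PySem.List.enumerate sequence.toList).map pvFA,
      (fun (x : Int × String × Int) => -x.2.2) x ∈ ([-1000,-900,-800,-750,-700,-650,-600,-500] : List Int) := by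
    intro x hx
    rcases List.mem_cons.mp hx with h | h
    · subst h; decide
    · rcases List.mem_map.mp h with ⟨p, _, rfl⟩
      rw [pvFA_eq]
      have hm := pvAffC_mem p.2
      simp only [List.mem_cons, List.not_mem_nil, or_false] at hm
      rcases hm with h|h|h|h|h|h|h <;> rw [h] <;> norm_num
  rw [pv_sorted_buckets (fun x : Int × String × Int => -x.2.2) [-1000,-900,-800,-750,-700,-650,-600,-500] _ (by decide) hmemb]
  rw [PySem.List.slice_to _ hch, List.map_take, List.map_flatMap]
  have hb1 : (PySem.Dict.mk (pvAffinityOrder.map (fun a => (a, ([] : List (Int × String)))))).modify 750 []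
        (fun l => l ++ [((0:Int), ("N-term":String))])
      = PySem.Dict.mk [(1000, []), (900, []), (800, []), (750, [((0:Int), ("N-term":String))]),
                       (700, []), (650, []), (600, []), (500, [])] := rfl
  rw [hb1]
  rw [PySem.List.slice_to _ hch]
  congr 1
  simp only [pvAffinityOrder, List.foldl_cons, List.foldl_nil, List.nil_append,
             List.flatMap_cons, List.flatMap_nil, List.append_nil, pv_fold_buckets,
             List.append_assoc]
  simp only [show ∀ v : Int, ∀ l0 : List (Int × String),
      (PySem.Dict.mk [(1000, []), (900, []), (800, []), (750, [((0:Int), ("N-term":String))]),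
                      (700, []), (650, []), (600, []), (500, [])]).getD v l0
      = if v = 750 then [((0:Int), ("N-term":String))] else
        if v = 1000 ∨ v = 900 ∨ v = 800 ∨ v = 700 ∨ v = 650 ∨ v = 600 ∨ v = 500 then [] else l0
    from fun v l0 => by
      by_cases e1 : v = 1000
      · subst e1; rfl
      by_cases e2 : v = 900
      · subst e2; rfl
      by_cases e3 : v = 800
      · subst e3; rfl
      by_cases e4 : v = 750
      · subst e4; rfl
      by_cases e5 : v = 700
      · subst e5; rfl
      by_cases e6 : v = 650
      · subst e6; rfl
      by_cases e7 : v = 600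
      · subst e7; rfl
      by_cases e8 : v = 500
      · subst e8; rfl
      · simp [PySem.Dict.getD, PySem.Dict.get?, Ne.symm e1, Ne.symm e2, Ne.symm e3, Ne.symm e4,
              Ne.symm e5, Ne.symm e6, Ne.symm e7, Ne.symm e8, e1, e2, e3, e4, e5, e6, e7, e8]]
  norm_num
  simp only [pv_bucket]
  norm_num
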